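-- pv_equiv track=rewrite | github.com/gsbang97/baekjun21-2 | 21315.py | mixCard
-- ===== SOURCE A (Python) =====
-- import math
--
-- def mixCard(cards, k):
--     two_k = int(math.pow(2,k))
--     tempCard = cards[len(cards)-two_k:]
--     remainCard = cards[:len(cards)-two_k]
--     if k == 0:
--         return tempCard + remainCard
--     else:
--         return mixCard(tempCard,k-1)+remainCard
-- ===== SOURCE B (Python) =====
-- import math
--
-- def mixCard(cards, k):
--     heads = []
--     cur = cards
--     for i in range(k, -1, -1):
--         two_i = int(math.pow(2, i))
--         cut = len(cur) - two_i
--         heads.append(cur[:cut])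
--         cur = cur[cut:]
--     res = cur
--     for h in reversed(heads):
--         res = res + h
--     return res
-- ===== Notes on version B (the rewrite author's own statement) =====
-- stated objective: alternative
-- what changed: Replaces A's post-concatenating recursion by an explicit loop from k down to 0 that splits off each 2^i tail, collecting the heads in a list and assembling the result from the final tail plus the heads in reverse collection order.
import Mathlib
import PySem

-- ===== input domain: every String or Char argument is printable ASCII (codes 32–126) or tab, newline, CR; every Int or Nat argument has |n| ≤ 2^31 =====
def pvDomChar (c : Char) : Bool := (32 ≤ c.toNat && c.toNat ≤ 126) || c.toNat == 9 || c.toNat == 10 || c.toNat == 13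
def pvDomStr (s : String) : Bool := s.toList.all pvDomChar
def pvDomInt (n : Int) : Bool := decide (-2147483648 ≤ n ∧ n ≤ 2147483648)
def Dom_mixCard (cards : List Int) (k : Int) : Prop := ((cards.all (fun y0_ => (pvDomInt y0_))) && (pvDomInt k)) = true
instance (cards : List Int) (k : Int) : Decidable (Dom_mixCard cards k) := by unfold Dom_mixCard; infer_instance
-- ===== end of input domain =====

-- B replaces A's post-concatenating recursion by an explicit countdown loop collecting heads;
-- return values agree for 0 ≤ k < 1024 (alternative decomposition, not claimed faster).

-- ===== PORT A =====
-- A's recursion on k; int(math.pow(2,k)) = 2^k exactly for 0 ≤ k ≤ 1023 (guaranteed by Pre_).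
def mixCardAux (cards : List Int) : Nat → List Int
  | 0 =>
    let two_k : Int := 2 ^ (0 : Nat)
    let tempCard := PySem.List.slice cards (some ((cards.length : Int) - two_k)) none
    let remainCard := PySem.List.slice cards none (some ((cards.length : Int) - two_k))
    tempCard ++ remainCard
  | k + 1 =>
    let two_k : Int := 2 ^ (k + 1)
    let tempCard := PySem.List.slice cards (some ((cards.length : Int) - two_k)) none
    let remainCard := PySem.List.slice cards none (some ((cards.length : Int) - two_k))
    mixCardAux tempCard k ++ remainCard

-- guard only for totality: for k < 0 the Python A recurses forever (excluded by Pre_)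
def mixCard (cards : List Int) (k : Int) : List Int :=
  if k < 0 then [] else mixCardAux cards k.toNat

-- ===== PORT B =====
-- one loop step of Source B's for-loop: split cur at cut = len(cur) - 2^i, stash the head
def mixStep (st : List (List Int) × List Int) (i : Int) : List (List Int) × List Int :=
  let cur := st.2
  let two_i : Int := 2 ^ i.toNat  -- int(math.pow(2,i)), exact for 0 ≤ i ≤ 1023
  let cut : Int := (cur.length : Int) - two_i
  (st.1 ++ [PySem.List.slice cur none (some cut)], PySem.List.slice cur (some cut) none)

def mixCard_alt (cards : List Int) (k : Int) : List Int :=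
  let st := (PySem.List.pyRange k (-1) (-1)).foldl mixStep ([], cards)
  st.1.reverse.foldl (fun res h => res ++ h) st.2

-- ===== PRECONDITION & SPEC =====
-- A raises outside 0 ≤ k < 1024: RecursionError for k < 0, OverflowError (math.pow) for k ≥ 1024.
def Pre_mixCard (cards : List Int) (k : Int) : Prop := 0 ≤ k ∧ k < 1024
instance (cards : List Int) (k : Int) : Decidable (Pre_mixCard cards k) := by unfold Pre_mixCard; infer_instance
def pvWitness_mixCard : List Int × Int := ([1, 2, 3, 4, 5, 6, 7], 2)

def Spec_mixCard (cards : List Int) (k : Int) (out : List Int) : Prop := out = mixCard_alt cards k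
instance (cards : List Int) (k : Int) (out : List Int) : Decidable (Spec_mixCard cards k out) := by unfold Spec_mixCard; infer_instance

-- ===== CLAIM (what is proved, stated in full; the proofs are below) =====
def Claim_equal_mixCard : Prop := ∀ (cards : List Int) (k : Int), Dom_mixCard cards k → Pre_mixCard cards k → Spec_mixCard cards k (mixCard cards k)

-- ===== LEMMAS AND PROOFS =====

-- heads are only appended, so a nonempty initial heads accumulator factors out
theorem foldl_mixStep_heads (l : List Int) : ∀ (hs : List (List Int)) (cur : List Int),
    l.foldl mixStep (hs, cur) =
      (hs ++ (l.foldl mixStep ([], cur)).1, (l.foldl mixStep ([], cur)).2) := by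
  induction l with
  | nil => intro hs cur; simp
  | cons i t ih =>
    intro hs cur
    have step : mixStep (hs, cur) i = (hs ++ (mixStep ([], cur) i).1, (mixStep ([], cur) i).2) := by
      simp [mixStep]
    simp only [List.foldl_cons, step]
    rw [ih (hs ++ (mixStep ([], cur) i).1) (mixStep ([], cur) i).2,
        ih (mixStep ([], cur) i).1 (mixStep ([], cur) i).2]
    simp

theorem foldl_append_eq_flatten (l : List (List Int)) : ∀ (init : List Int),
    l.foldl (fun res h => res ++ h) init = init ++ l.flatten := by
  induction l with
  | nil => intro init; simp
  | cons h t ih => intro init; simp [ih]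

-- the core invariant: A's recursion equals B's loop result for every natural k
theorem mixCardAux_eq_loop (k : Nat) : ∀ (cards : List Int),
    mixCardAux cards k =
      (((PySem.List.pyRange (k : Int) (-1) (-1)).foldl mixStep ([], cards)).2) ++
      (((PySem.List.pyRange (k : Int) (-1) (-1)).foldl mixStep ([], cards)).1).reverse.flatten := by
  induction k with
  | zero =>
    intro cards
    rw [PySem.List.pyRange_neg_one_cons (by norm_num), PySem.List.pyRange_neg_one_eq_nil (by norm_num)]
    simp [mixCardAux, mixStep]
  | succ k ih =>
    intro cards
    have hcons : PySem.List.pyRange ((k + 1 : Nat) : Int) (-1) (-1) =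
        ((k + 1 : Nat) : Int) :: PySem.List.pyRange (k : Int) (-1) (-1) := by
      have := PySem.List.pyRange_neg_one_cons (a := ((k + 1 : Nat) : Int)) (b := (-1)) (by push_cast; omega)
      simpa using this
    rw [hcons]
    simp only [List.foldl_cons]
    have hstep : mixStep ([], cards) ((k + 1 : Nat) : Int) =
        ([PySem.List.slice cards none (some ((cards.length : Int) - 2 ^ (k + 1)))],
         PySem.List.slice cards (some ((cards.length : Int) - 2 ^ (k + 1))) none) := by
      simp [mixStep]
    rw [hstep, foldl_mixStep_heads]
    simp only [List.reverse_append, List.flatten_append]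
    rw [← List.append_assoc]
    rw [show mixCardAux cards (k + 1) =
        mixCardAux (PySem.List.slice cards (some ((cards.length : Int) - 2 ^ (k + 1))) none) k ++
          PySem.List.slice cards none (some ((cards.length : Int) - 2 ^ (k + 1))) from rfl]
    rw [ih]
    simp

-- ===== VERDICT (by name: the statement is the Claim_ definition above) =====
theorem mixCard_spec : Claim_equal_mixCard := by
  intro cards k _ hpre
  unfold Pre_mixCard at hpre
  unfold Spec_mixCard mixCard mixCard_alt
  rw [if_neg (by omega : ¬ k < 0)]
  have hk : ((k.toNat : Nat) : Int) = k := Int.toNat_of_nonneg hpre.1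
  rw [mixCardAux_eq_loop k.toNat cards, hk, foldl_append_eq_flatten]
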